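-- pv_equiv track=rewrite | github.com/Archversee/TP2-CloudNative_AI_Sustainability_Proj | services/ai_auditor/ai_auditor.py | sample_generic_metrics
-- ===== SOURCE A (Python) =====
-- def sample_generic_metrics(metrics, max_samples=50):
--     """Intelligently sample generic metrics to reduce payload size."""
--     if len(metrics) <= max_samples:
--         return metrics
--
--     # Group metrics by page for proportional sampling
--     by_page = {}
--     for m in metrics:
--         page = m.get('page', 0)
--         if page not in by_page:
--             by_page[page] = []
--         by_page[page].append(m)
--
--     # Sample proportionally from each page
--     sampled = []
--     total_pages = len(by_page)
--     samples_per_page = max(1, max_samples // total_pages)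
--
--     for page in sorted(by_page.keys()):
--         page_metrics = by_page[page]
--         # Take first N metrics from each page (usually most relevant)
--         sampled.extend(page_metrics[:samples_per_page])
--
--         if len(sampled) >= max_samples:
--             break
--
--     return sampled[:max_samples]
-- ===== SOURCE B (Python) =====
-- def sample_generic_metrics(metrics, max_samples=50):
--     """Proportionally sample metrics per page without building any grouping:
--     collect the distinct pages, then for each page (ascending) re-scan the
--     original list with a counter, taking the first quota of matches."""
--     if len(metrics) <= max_samples:
--         return metrics
--
--     pages = sorted({m.get('page', 0) for m in metrics})
--     samples_per_page = max(1, max_samples // len(pages))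
--
--     sampled = []
--     for p in pages:
--         taken = 0
--         for m in metrics:
--             if taken == samples_per_page:
--                 break
--             if m.get('page', 0) == p:
--                 sampled.append(m)
--                 taken += 1
--         if len(sampled) >= max_samples:
--             break
--
--     return sampled[:max_samples]
-- ===== Notes on version B (the rewrite author's own statement) =====
-- stated objective: alternative
-- what changed: Removes A's dict-of-lists grouping entirely: B only collects the distinct pages into a sorted set and then, for each selected page, re-scans the original metrics list with a per-page counter, taking the first quota of matching items; no per-page lists are ever materialized.
import Mathlib
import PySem

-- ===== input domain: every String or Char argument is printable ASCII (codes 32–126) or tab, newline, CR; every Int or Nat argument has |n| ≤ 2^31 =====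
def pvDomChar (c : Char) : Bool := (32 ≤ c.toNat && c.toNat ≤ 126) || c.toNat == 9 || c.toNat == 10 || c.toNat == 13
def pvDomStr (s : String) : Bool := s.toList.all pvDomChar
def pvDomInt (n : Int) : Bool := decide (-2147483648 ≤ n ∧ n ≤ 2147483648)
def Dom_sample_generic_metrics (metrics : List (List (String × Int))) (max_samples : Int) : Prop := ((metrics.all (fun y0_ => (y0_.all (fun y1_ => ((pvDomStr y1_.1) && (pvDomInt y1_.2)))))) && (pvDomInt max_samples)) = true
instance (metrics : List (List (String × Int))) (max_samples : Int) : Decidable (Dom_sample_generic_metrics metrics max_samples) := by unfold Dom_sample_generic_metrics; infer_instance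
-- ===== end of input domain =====

-- B drops A's dict-of-lists grouping: it collects only the distinct pages and re-scans
-- the original list per selected page with a counter; return values proved equal on Pre_.

-- m.get('page', 0)  (shared by both ports)
def pvPage (m : List (String × Int)) : Int := PySem.Dict.getD (PySem.Dict.mk m) "page" 0

-- ===== PORT A =====
-- A's 'for page in sorted(by_page.keys())' sampling loop, with its break
def pvLoopA (by_page : PySem.Dict Int (List (List (String × Int)))) (spp max_samples : Int) :
    List Int → List (List (String × Int)) → List (List (String × Int))
  | [], sampled => sampled
  | p :: rest, sampled =>
    let sampled := sampled ++ PySem.List.slice (by_page.getD p []) none (some spp)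
    if max_samples ≤ (sampled.length : Int) then sampled
    else pvLoopA by_page spp max_samples rest sampled

def sample_generic_metrics (metrics : List (List (String × Int))) (max_samples : Int) :
    List (List (String × Int)) :=
  if (metrics.length : Int) ≤ max_samples then metrics
  else
    let by_page : PySem.Dict Int (List (List (String × Int))) :=
      metrics.foldl (fun d m =>
        let d := if d.contains (pvPage m) then d else d.insert (pvPage m) []
        d.modify (pvPage m) [] (fun g => g ++ [m])) PySem.Dict.empty
    let total_pages : Int := by_page.size
    let spp := max 1 (PySem.Int.floordiv max_samples total_pages)
    let sampled := pvLoopA by_page spp max_samples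
      (PySem.List.sorted by_page.keys (fun p => p) false) []
    PySem.List.slice sampled none (some max_samples)

-- ===== PORT B =====
-- B's inner scan: walk the whole metrics list, appending matches of page p to
-- sampled until 'taken == spp' breaks the scan
def pvScanPage (p spp : Int) :
    List (List (String × Int)) → Int → List (List (String × Int)) → List (List (String × Int))
  | [], _, sampled => sampled
  | m :: rest, taken, sampled =>
    if taken == spp then sampled
    else if pvPage m == p then pvScanPage p spp rest (taken + 1) (sampled ++ [m])
    else pvScanPage p spp rest taken sampled

-- B's outer loop over the sorted distinct pages, with its break
def pvLoopB (metrics : List (List (String × Int))) (spp max_samples : Int) :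
    List Int → List (List (String × Int)) → List (List (String × Int))
  | [], sampled => sampled
  | p :: rest, sampled =>
    let sampled := pvScanPage p spp metrics 0 sampled
    if max_samples ≤ (sampled.length : Int) then sampled
    else pvLoopB metrics spp max_samples rest sampled

def sample_generic_metrics_alt (metrics : List (List (String × Int))) (max_samples : Int) :
    List (List (String × Int)) :=
  if (metrics.length : Int) ≤ max_samples then metrics
  else
    let pages := PySem.List.sorted (PySem.Set.ofList (metrics.map pvPage)) (fun p => p) false
    let spp := max 1 (PySem.Int.floordiv max_samples (pages.length : Int))
    let sampled := pvLoopB metrics spp max_samples pages []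
    PySem.List.slice sampled none (some max_samples)

-- ===== PRECONDITION & SPEC =====
-- Pre_ excludes only an empty metrics list combined with a negative max_samples: there
-- Python A raises ZeroDivisionError on max_samples // 0, the dict of pages being empty
-- (Python B raises there too).
def Pre_sample_generic_metrics (metrics : List (List (String × Int))) (max_samples : Int) : Prop :=
  metrics ≠ [] ∨ 0 ≤ max_samples
instance (metrics : List (List (String × Int))) (max_samples : Int) :
    Decidable (Pre_sample_generic_metrics metrics max_samples) := by
  unfold Pre_sample_generic_metrics; infer_instance

def pvWitness_sample_generic_metrics : (List (List (String × Int))) × Int :=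
  ([[("page", 1)], [("page", 2)], [("page", 1)]], 2)

def Spec_sample_generic_metrics (metrics : List (List (String × Int))) (max_samples : Int)
    (out : List (List (String × Int))) : Prop :=
  out = sample_generic_metrics_alt metrics max_samples
instance (metrics : List (List (String × Int))) (max_samples : Int)
    (out : List (List (String × Int))) : Decidable (Spec_sample_generic_metrics metrics max_samples out) := by
  unfold Spec_sample_generic_metrics; infer_instance

-- ===== CLAIM (what is proved, stated in full; the proofs are below) =====
def Claim_equal_sample_generic_metrics : Prop := ∀ (metrics : List (List (String × Int))) (max_samples : Int), Dom_sample_generic_metrics metrics max_samples → Pre_sample_generic_metrics metrics max_samples → Spec_sample_generic_metrics metrics max_samples (sample_generic_metrics metrics max_samples)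

-- ===== LEMMAS AND PROOFS =====

-- the metrics of page p, in original order (proof-side only)
def pvFiber (metrics : List (List (String × Int))) (p : Int) : List (List (String × Int)) :=
  metrics.filter (fun m => pvPage m == p)

theorem pvStep_eq (d : PySem.Dict Int (List (List (String × Int)))) (m : List (String × Int)) :
    (let d' := if d.contains (pvPage m) then d else d.insert (pvPage m) []
     d'.modify (pvPage m) [] (fun g => g ++ [m])) =
    d.modify (pvPage m) [] (fun g => g ++ [m]) := by
  by_cases h : d.contains (pvPage m)
  · simp [h]
  · simp only [h, if_false, Bool.false_eq_true]
    have h0 : d.getD (pvPage m) [] = [] :=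
      PySem.Dict.getD_of_not_contains d [] (by simpa using h)
    simp [PySem.Dict.modify, PySem.Dict.insert_insert_self, PySem.Dict.getD_insert_self, h0]

theorem pvByPage_getD (metrics : List (List (String × Int))) (p : Int) :
    (metrics.foldl (fun d m =>
        let d := if d.contains (pvPage m) then d else d.insert (pvPage m) []
        d.modify (pvPage m) [] (fun g => g ++ [m])) PySem.Dict.empty).getD p [] =
      pvFiber metrics p := by
  rw [PySem.List.foldl_congr_mem _ _ (fun d m => d.modify (pvPage m) [] (fun g => g ++ [m])) _
    (fun acc x _ => pvStep_eq acc x)]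
  have h2 : metrics.foldl (fun d m => d.modify (pvPage m) [] (fun g => g ++ [m])) PySem.Dict.empty
      = (metrics.map (fun m => (pvPage m, m))).foldl
          (fun d q => d.modify q.1 [] (fun g => g ++ [q.2])) PySem.Dict.empty := by
    rw [List.foldl_map]
  rw [h2, PySem.Dict.getD_foldl_modify_append]
  simp [pvFiber, List.filter_map, Function.comp_def]

theorem pvByPage_keys (metrics : List (List (String × Int))) :
    (metrics.foldl (fun d m =>
        let d := if d.contains (pvPage m) then d else d.insert (pvPage m) []
        d.modify (pvPage m) [] (fun g => g ++ [m])) PySem.Dict.empty).keys =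
      PySem.Set.ofList (metrics.map pvPage) := by
  rw [PySem.List.foldl_congr_mem _ _ (fun d m => d.modify (pvPage m) [] (fun g => g ++ [m])) _
    (fun acc x _ => pvStep_eq acc x)]
  rw [PySem.Dict.keys_foldl_modify_key (f := fun _ m g => g ++ [m])]
  rfl

-- B's counted scan over the whole list collects exactly the first (spp - taken) fiber elements
theorem pvScanPage_eq (p spp : Int) (xs : List (List (String × Int))) :
    ∀ (taken : Int) (sampled : List (List (String × Int))), taken ≤ spp →
    pvScanPage p spp xs taken sampled =
      sampled ++ (pvFiber xs p).take (spp - taken).toNat := by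
  induction xs with
  | nil => intro taken sampled _; simp [pvScanPage, pvFiber]
  | cons m rest ih =>
    intro taken sampled hle
    by_cases heq : taken == spp
    · have h0 : (spp - taken).toNat = 0 := by simp at heq; omega
      simp [pvScanPage, heq, h0]
    · have hlt : taken < spp := by simp at heq; omega
      have hn : (spp - taken).toNat = (spp - (taken + 1)).toNat + 1 := by omega
      by_cases hp : pvPage m == p
      · simp only [pvScanPage, heq, Bool.false_eq_true, if_false, hp, if_true]
        rw [ih (taken + 1) (sampled ++ [m]) (by omega)]
        simp [pvFiber, hp, hn]
      · simp only [pvScanPage, heq, Bool.false_eq_true, if_false, hp, if_false]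
        rw [ih taken sampled hle]
        simp [pvFiber, hp]

-- the two sampling loops agree when the dict's fibers match the re-scans
theorem pvLoops_eq (by_page : PySem.Dict Int (List (List (String × Int))))
    (metrics : List (List (String × Int))) (spp max_samples : Int)
    (hspp : 0 ≤ spp)
    (h : ∀ p, by_page.getD p [] = pvFiber metrics p) :
    ∀ (ps : List Int) (sampled : List (List (String × Int))),
    pvLoopA by_page spp max_samples ps sampled = pvLoopB metrics spp max_samples ps sampled := by
  intro ps
  induction ps with
  | nil => intro sampled; rfl
  | cons p rest ih =>
    intro sampled
    have hs : PySem.List.slice (by_page.getD p []) none (some spp) =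
        (pvFiber metrics p).take spp.toNat := by
      rw [h p, PySem.List.slice_to _ hspp]
    have hscan : pvScanPage p spp metrics 0 sampled =
        sampled ++ (pvFiber metrics p).take spp.toNat := by
      rw [pvScanPage_eq p spp metrics 0 sampled hspp]
      simp
    simp only [pvLoopA, pvLoopB, hs, hscan]
    split
    · rfl
    · exact ih _

theorem pv_main (metrics : List (List (String × Int))) (max_samples : Int) :
    sample_generic_metrics metrics max_samples = sample_generic_metrics_alt metrics max_samples := by
  unfold sample_generic_metrics sample_generic_metrics_alt
  split
  · rfl
  · set BP : PySem.Dict Int (List (List (String × Int))) :=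
      metrics.foldl (fun d m =>
        let d := if d.contains (pvPage m) then d else d.insert (pvPage m) []
        d.modify (pvPage m) [] (fun g => g ++ [m])) PySem.Dict.empty with hBP
    have hkeys : BP.keys = PySem.Set.ofList (metrics.map pvPage) := pvByPage_keys metrics
    have hsize : (BP.size : Int) =
        ((PySem.List.sorted (PySem.Set.ofList (metrics.map pvPage)) (fun p => p) false).length : Int) := by
      have h1 : BP.size = BP.keys.length := by
        simp [PySem.Dict.size, PySem.Dict.keys]
      rw [h1, hkeys, PySem.List.length_sorted]
    have hspp : (0:Int) ≤ max 1 (PySem.Int.floordiv max_samples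
        ((PySem.List.sorted (PySem.Set.ofList (metrics.map pvPage)) (fun p => p) false).length : Int)) := by
      exact le_trans (by norm_num) (le_max_left _ _)
    simp only [hkeys, hsize]
    rw [pvLoops_eq BP metrics _ max_samples hspp (fun p => pvByPage_getD metrics p)]

-- ===== VERDICT (by name: the statement is the Claim_ definition above) =====
theorem sample_generic_metrics_spec : Claim_equal_sample_generic_metrics := by
  intro metrics max_samples _ _
  unfold Spec_sample_generic_metrics
  exact pv_main metrics max_samples
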